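-- pv_equiv track=rewrite | github.com/Naylepsh/MP-egzamin-lic-inz | 2020_02_01.py | belongs
-- ===== SOURCE A (Python) =====
-- def belongs(word: str):
--     if len(word) == 0:
--         return True
--
--     if word.startswith('cc') and word.endswith('cc') and len(word) >= 4:
--         return belongs(word[2:-2])
--     if word.startswith(6*'a'):
--         return belongs(word[6:])
--     if word.startswith(6*'b'):
--         return belongs(word[6:])
--     return False
-- ===== SOURCE B (Python) =====
-- def belongs(word: str):
--     # Two-pointer scan over index window [i, j) instead of recursive slicing.
--     i, j = 0, len(word)
--     while i < j:
--         n = j - i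
--         if n >= 4 and word[i:i+2] == 'cc' and word[j-2:j] == 'cc':
--             i += 2
--             j -= 2
--         elif n >= 6 and word[i:i+6] == 'aaaaaa':
--             i += 6
--         elif n >= 6 and word[i:i+6] == 'bbbbbb':
--             i += 6
--         else:
--             return False
--     return True
-- ===== Notes on version B (the rewrite author's own statement) =====
-- stated objective: faster
-- what changed: Replaces A's recursion that copies string slices at every step with an iterative two-pointer scan over a fixed window [i, j), comparing only constant-length pieces, so no O(n) copies are made.
import Mathlib
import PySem

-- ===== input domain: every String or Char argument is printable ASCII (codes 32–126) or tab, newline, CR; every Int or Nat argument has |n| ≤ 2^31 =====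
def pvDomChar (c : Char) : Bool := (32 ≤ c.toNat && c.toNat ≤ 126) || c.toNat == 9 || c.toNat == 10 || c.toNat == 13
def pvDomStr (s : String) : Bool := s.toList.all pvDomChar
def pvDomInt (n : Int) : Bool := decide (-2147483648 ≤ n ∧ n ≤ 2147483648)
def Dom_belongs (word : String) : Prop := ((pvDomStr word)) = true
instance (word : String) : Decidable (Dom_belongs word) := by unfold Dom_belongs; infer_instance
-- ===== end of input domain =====

-- B replaces A's recursion over freshly copied string slices by an iterative
-- two-pointer scan of a window [i, j), comparing only constant-length pieces.

-- ===== PORT A =====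
-- the two slice shapes A uses, in drop/take form (cited by the ports' termination proofs)
theorem pv_slice_inner (cs : List Char) (h : 4 ≤ cs.length) :
    PySem.List.slice cs (some 2) (some (-2)) = (cs.drop 2).take (cs.length - 4) := by
  simp [PySem.List.slice, PySem.List.clampIdx]
  split_ifs with h1
  · omega
  · rw [min_eq_left (by omega)]; congr 1; omega

theorem pv_slice_from6 (cs : List Char) :
    PySem.List.slice cs (some 6) none = cs.drop 6 := by
  simp [PySem.List.slice, PySem.List.clampIdx]
  rcases Nat.le_total 6 cs.length with h | h
  · rw [min_eq_left (by omega), List.take_of_length_le (by simp)]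
  · rw [min_eq_right (by omega)]
    simp [List.drop_of_length_le h, List.take_of_length_le]

def belongsA (cs : List Char) : Bool :=
  if PySem.Chars.len cs = 0 then true
  else if hc : PySem.Chars.startswith cs ['c', 'c'] = true ∧
               PySem.Chars.endswith cs ['c', 'c'] = true ∧ 4 ≤ PySem.Chars.len cs then
    belongsA (PySem.List.slice cs (some 2) (some (-2)))
  else if ha : PySem.Chars.startswith cs ['a', 'a', 'a', 'a', 'a', 'a'] = true then
    belongsA (PySem.List.slice cs (some 6) none)
  else if hb : PySem.Chars.startswith cs ['b', 'b', 'b', 'b', 'b', 'b'] = true then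
    belongsA (PySem.List.slice cs (some 6) none)
  else false
termination_by cs.length
decreasing_by
  · rw [pv_slice_inner cs (by simpa using hc.2.2)]
    have h4 : 4 ≤ cs.length := by simpa using hc.2.2
    simp; omega
  · have := ((PySem.Chars.startswith_iff cs _).mp ha).length_le
    rw [pv_slice_from6]; simp at this ⊢; omega
  · have := ((PySem.Chars.startswith_iff cs _).mp hb).length_le
    rw [pv_slice_from6]; simp at this ⊢; omega

def belongs (word : String) : Bool := belongsA word.toList

-- ===== PORT B =====
def belongsGo (cs : List Char) (i j : Nat) : Bool :=
  if hij : i < j then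
    if hcc : 4 ≤ j - i ∧
        PySem.List.slice cs (some (i : Int)) (some ((i : Int) + 2)) = ['c', 'c'] ∧
        PySem.List.slice cs (some ((j : Int) - 2)) (some (j : Int)) = ['c', 'c'] then
      belongsGo cs (i + 2) (j - 2)
    else if ha : 6 ≤ j - i ∧
        PySem.List.slice cs (some (i : Int)) (some ((i : Int) + 6)) = ['a', 'a', 'a', 'a', 'a', 'a'] then
      belongsGo cs (i + 6) j
    else if hb : 6 ≤ j - i ∧
        PySem.List.slice cs (some (i : Int)) (some ((i : Int) + 6)) = ['b', 'b', 'b', 'b', 'b', 'b'] then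
      belongsGo cs (i + 6) j
    else false
  else true
termination_by j - i
decreasing_by
  · omega
  · omega
  · omega

def belongs_alt (word : String) : Bool := belongsGo word.toList 0 word.toList.length

-- ===== PRECONDITION & SPEC =====
def Spec_belongs (word : String) (out : Bool) : Prop := out = belongs_alt word
instance (word : String) (out : Bool) : Decidable (Spec_belongs word out) := by unfold Spec_belongs; infer_instance

-- ===== CLAIM (what is proved, stated in full; the proofs are below) =====
def Claim_equal_belongs : Prop := ∀ (word : String), Dom_belongs word → Spec_belongs word (belongs word)

-- ===== LEMMAS AND PROOFS =====

-- the window [i, j) of cs, as the list A recurses on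
theorem pv_key (n : Nat) : ∀ (cs : List Char) (i j : Nat), i ≤ j → j ≤ cs.length → j - i ≤ n →
    belongsA ((cs.drop i).take (j - i)) = belongsGo cs i j := by
  induction n with
  | zero =>
    intro cs i j hij hj hn
    have : j - i = 0 := by omega
    rw [this, belongsGo, belongsA]
    simp [dif_neg (by omega : ¬ i < j)]
  | succ n ih =>
    intro cs i j hij hj hn
    by_cases hlt : i < j
    · set sub := (cs.drop i).take (j - i) with hsubdef
      have hsublen : sub.length = j - i := by
        simp [hsubdef]; omega
      -- window algebra
      have htake : ∀ (k : Nat), k ≤ j - i → sub.take k = (cs.drop i).take k := by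
        intro k hk
        rw [hsubdef, List.take_take, min_eq_left hk]
      have hdroptake : ∀ (a k : Nat), a + k ≤ j - i →
          (sub.drop a).take k = (cs.drop (i + a)).take k := by
        intro a k hk
        rw [hsubdef, List.drop_take, List.drop_drop, List.take_take,
            min_eq_left (by omega)]
      -- slice bounds of B, in drop/take form
      have hsliceB : ∀ (a k : Nat), PySem.List.slice cs (some (a : Int)) (some ((a : Int) + (k : Nat))) =
          (cs.drop a).take k := by
        intro a k
        have : ((a : Int) + (k : Nat)) = ((a + k : Nat) : Int) := by push_cast; ring
        rw [this, PySem.List.slice_natCast]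
        congr 1; omega
      rw [belongsA, belongsGo, dif_pos hlt]
      rw [if_neg (by simp [hsublen]; omega)]
      -- the cc condition
      by_cases hcc : 4 ≤ j - i ∧ (cs.drop i).take 2 = ['c', 'c'] ∧ (cs.drop (j - 2)).take 2 = ['c', 'c']
      · have hccA : PySem.Chars.startswith sub ['c', 'c'] = true ∧
            PySem.Chars.endswith sub ['c', 'c'] = true ∧ 4 ≤ PySem.Chars.len sub := by
          refine ⟨?_, ?_, by simp [hsublen]; omega⟩
          · rw [PySem.Chars.startswith_iff, List.prefix_iff_eq_take]
            rw [show (['c','c'] : List Char).length = 2 from rfl, htake 2 (by omega), hcc.2.1]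
          · rw [PySem.Chars.endswith_iff, List.suffix_iff_eq_drop]
            rw [show (['c','c'] : List Char).length = 2 from rfl, hsublen]
            have : sub.drop (j - i - 2) = (sub.drop (j - i - 2)).take 2 := by
              rw [List.take_of_length_le (by simp [hsublen]; omega)]
            rw [this, hdroptake (j - i - 2) 2 (by omega),
                show i + (j - i - 2) = j - 2 by omega, hcc.2.2]
        have hccB : 4 ≤ j - i ∧
            PySem.List.slice cs (some (i : Int)) (some ((i : Int) + 2)) = ['c', 'c'] ∧
            PySem.List.slice cs (some ((j : Int) - 2)) (some (j : Int)) = ['c', 'c'] := by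
          refine ⟨hcc.1, ?_, ?_⟩
          · have := hsliceB i 2; simp at this; rw [this, hcc.2.1]
          · have h2 : ((j : Int) - 2) = ((j - 2 : Nat) : Int) := by omega
            have h3 : (j : Int) = ((j - 2 : Nat) : Int) + ((2 : Nat) : Int) := by omega
            rw [h2, h3, hsliceB (j - 2) 2, hcc.2.2]
        rw [dif_pos hccA, dif_pos hccB]
        have harg : PySem.List.slice sub (some 2) (some (-2)) =
            (cs.drop (i + 2)).take ((j - 2) - (i + 2)) := by
          rw [pv_slice_inner sub (by omega), hsublen,
              hdroptake 2 (j - i - 4) (by omega)]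
          congr 1; omega
        rw [harg]
        exact ih cs (i + 2) (j - 2) (by omega) (by omega) (by omega)
      · have hccA : ¬ (PySem.Chars.startswith sub ['c', 'c'] = true ∧
            PySem.Chars.endswith sub ['c', 'c'] = true ∧ 4 ≤ PySem.Chars.len sub) := by
          intro ⟨h1, h2, h3⟩
          apply hcc
          have h4 : 4 ≤ j - i := by simp [hsublen] at h3; omega
          refine ⟨h4, ?_, ?_⟩
          · rw [PySem.Chars.startswith_iff, List.prefix_iff_eq_take] at h1
            rw [show (['c','c'] : List Char).length = 2 from rfl, htake 2 (by omega)] at h1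
            exact h1.symm
          · rw [PySem.Chars.endswith_iff, List.suffix_iff_eq_drop] at h2
            rw [show (['c','c'] : List Char).length = 2 from rfl, hsublen] at h2
            have hle : sub.drop (j - i - 2) = (sub.drop (j - i - 2)).take 2 := by
              rw [List.take_of_length_le (by simp [hsublen]; omega)]
            rw [hle, hdroptake (j - i - 2) 2 (by omega),
                show i + (j - i - 2) = j - 2 by omega] at h2
            exact h2.symm
        have hccB : ¬ (4 ≤ j - i ∧
            PySem.List.slice cs (some (i : Int)) (some ((i : Int) + 2)) = ['c', 'c'] ∧
            PySem.List.slice cs (some ((j : Int) - 2)) (some (j : Int)) = ['c', 'c']) := by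
          intro ⟨h1, h2, h3⟩
          apply hcc
          refine ⟨h1, ?_, ?_⟩
          · have := hsliceB i 2; simp at this; rw [this] at h2; exact h2
          · have he2 : ((j : Int) - 2) = ((j - 2 : Nat) : Int) := by omega
            have he3 : (j : Int) = ((j - 2 : Nat) : Int) + ((2 : Nat) : Int) := by omega
            rw [he2, he3, hsliceB (j - 2) 2] at h3; exact h3
        rw [dif_neg hccA, dif_neg hccB]
        -- the a / b prefix conditions
        have hpref : ∀ (p : List Char), p.length = 6 →
            (PySem.Chars.startswith sub p = true ↔
              (6 ≤ j - i ∧ PySem.List.slice cs (some (i : Int)) (some ((i : Int) + 6)) = p)) := by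
          intro p hp
          have h6 := hsliceB i 6
          have h6' : ((i : Int) + 6) = ((i : Int) + ((6 : Nat) : Int)) := by norm_num
          rw [PySem.Chars.startswith_iff, List.prefix_iff_eq_take, hp]
          constructor
          · intro h
            have hlen : 6 ≤ j - i := by
              have := congrArg List.length h
              simp [hp, hsublen] at this; omega
            rw [htake 6 hlen] at h
            rw [h6', h6]
            exact ⟨hlen, h.symm⟩
          · intro ⟨h1, h2⟩
            rw [h6', h6] at h2
            rw [htake 6 h1, h2]
        have harg6 : ∀ (h6 : 6 ≤ j - i), PySem.List.slice sub (some 6) none =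
            (cs.drop (i + 6)).take (j - (i + 6)) := by
          intro h6
          have : sub.drop 6 = (sub.drop 6).take (j - i - 6) := by
            rw [List.take_of_length_le (by simp [hsublen])]
          rw [pv_slice_from6, this, hdroptake 6 (j - i - 6) (by omega), Nat.sub_sub]
        by_cases hA : 6 ≤ j - i ∧
            PySem.List.slice cs (some (i : Int)) (some ((i : Int) + 6)) = ['a', 'a', 'a', 'a', 'a', 'a']
        · rw [dif_pos ((hpref _ rfl).mpr hA), dif_pos hA, harg6 hA.1]
          exact ih cs (i + 6) j (by omega) (by omega) (by omega)
        · rw [dif_neg (fun h => hA ((hpref _ rfl).mp h)), dif_neg hA]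
          by_cases hB : 6 ≤ j - i ∧
              PySem.List.slice cs (some (i : Int)) (some ((i : Int) + 6)) = ['b', 'b', 'b', 'b', 'b', 'b']
          · rw [dif_pos ((hpref _ rfl).mpr hB), dif_pos hB, harg6 hB.1]
            exact ih cs (i + 6) j (by omega) (by omega) (by omega)
          · rw [dif_neg (fun h => hB ((hpref _ rfl).mp h)), dif_neg hB]
    · have : j - i = 0 := by omega
      rw [this, belongsGo, belongsA]
      simp [dif_neg hlt]

-- ===== VERDICT (by name: the statement is the Claim_ definition above) =====
theorem belongs_spec : Claim_equal_belongs := by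
  intro word _
  unfold Spec_belongs belongs belongs_alt
  have h := pv_key word.toList.length word.toList 0 word.toList.length
    (by omega) (le_refl _) (by omega)
  rwa [show (word.toList.drop 0).take (word.toList.length - 0) = word.toList by simp] at h
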